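-- pv_equiv track=rewrite | github.com/tomatillos/loopfuse | loopfuse/torch_backend/ops.py | is_single_dim_insertion
-- ===== SOURCE A (Python) =====
-- def is_single_dim_insertion(from_shape: list[int], to_shape: list[int]) -> bool:
--     if len(to_shape) != len(from_shape) + 1:
--         return False
--
--     for insert_pos in range(len(to_shape)):
--         if to_shape[insert_pos] == 1:
--             reconstructed = to_shape[:insert_pos] + to_shape[insert_pos + 1 :]
--             if reconstructed == from_shape:
--                 return True
--     return False
-- ===== SOURCE B (Python) =====
-- def is_single_dim_insertion(from_shape: list[int], to_shape: list[int]) -> bool: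
--     if len(to_shape) != len(from_shape) + 1:
--         return False
--     # advance to the first index where the shapes diverge
--     i = 0
--     while i < len(from_shape) and from_shape[i] == to_shape[i]:
--         i += 1
--     # the inserted size-1 dim can only sit at the divergence point
--     return to_shape[i] == 1 and to_shape[i + 1:] == from_shape[i:]
-- ===== Notes on version B (the rewrite author's own statement) =====
-- stated objective: simpler
-- what changed: Replaces A's try-every-position reconstruct-and-compare loop (building a candidate list for each index) by a single scan to the first divergence point plus one tail comparison there.
import Mathlib
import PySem

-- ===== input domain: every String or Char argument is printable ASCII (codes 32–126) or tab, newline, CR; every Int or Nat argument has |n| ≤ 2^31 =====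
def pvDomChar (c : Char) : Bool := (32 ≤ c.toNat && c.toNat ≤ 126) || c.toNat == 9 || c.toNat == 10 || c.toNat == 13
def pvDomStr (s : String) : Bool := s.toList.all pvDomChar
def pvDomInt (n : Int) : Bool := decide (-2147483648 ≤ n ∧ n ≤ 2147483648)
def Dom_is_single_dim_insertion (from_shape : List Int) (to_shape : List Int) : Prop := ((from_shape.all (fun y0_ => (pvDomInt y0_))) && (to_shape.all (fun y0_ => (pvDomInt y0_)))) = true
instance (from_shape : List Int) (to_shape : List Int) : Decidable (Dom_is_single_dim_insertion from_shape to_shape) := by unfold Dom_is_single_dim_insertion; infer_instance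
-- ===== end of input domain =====

-- B replaces A's try-every-position reconstruct-and-compare with one scan to the first
-- divergence point plus a single tail comparison there (simpler, one pass).


-- ===== PORT A =====
def is_single_dim_insertion (from_shape : List Int) (to_shape : List Int) : Bool :=
  if to_shape.length ≠ from_shape.length + 1 then false
  else
    -- 'for insert_pos in range(len(to_shape)): if …: return True' / 'return False' = any
    (PySem.List.pyRange 0 (to_shape.length : Int) 1).any (fun insert_pos =>
      PySem.List.pyGetD to_shape insert_pos 0 == 1 &&
      (PySem.List.slice to_shape none (some insert_pos) ++
       PySem.List.slice to_shape (some (insert_pos + 1)) none) == from_shape)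

-- ===== PORT B =====
-- 'while i < len(from_shape) and from_shape[i] == to_shape[i]: i += 1' walking both lists,
-- then 'to_shape[i] == 1 and to_shape[i+1:] == from_shape[i:]' at the divergence point
def pvScanDiv : List Int → List Int → Bool
  | f :: fs, t :: ts => if f == t then pvScanDiv fs ts else t == 1 && ts == f :: fs
  | [], t :: ts => t == 1 && ts == ([] : List Int)
  | _, [] => false

def is_single_dim_insertion_alt (from_shape : List Int) (to_shape : List Int) : Bool :=
  if to_shape.length ≠ from_shape.length + 1 then false
  else pvScanDiv from_shape to_shape

-- ===== PRECONDITION & SPEC =====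
def Spec_is_single_dim_insertion (from_shape : List Int) (to_shape : List Int) (out : Bool) : Prop := out = is_single_dim_insertion_alt from_shape to_shape
instance (from_shape : List Int) (to_shape : List Int) (out : Bool) : Decidable (Spec_is_single_dim_insertion from_shape to_shape out) := by unfold Spec_is_single_dim_insertion; infer_instance

-- ===== CLAIM (what is proved, stated in full; the proofs are below) =====
def Claim_equal_is_single_dim_insertion : Prop := ∀ (from_shape : List Int) (to_shape : List Int), Dom_is_single_dim_insertion from_shape to_shape → Spec_is_single_dim_insertion from_shape to_shape (is_single_dim_insertion from_shape to_shape)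

-- ===== LEMMAS AND PROOFS =====

-- A's loop over Nat indices, with the PySem slicing already reduced to take/drop
def pvABool (from_shape to_shape : List Int) : Bool :=
  (List.range to_shape.length).any (fun k =>
    to_shape.getD k 0 == 1 && (to_shape.take k ++ to_shape.drop (k + 1)) == from_shape)

lemma pvA_loop_eq (from_shape to_shape : List Int) :
    ((PySem.List.pyRange 0 (to_shape.length : Int) 1).any (fun insert_pos =>
      PySem.List.pyGetD to_shape insert_pos 0 == 1 &&
      (PySem.List.slice to_shape none (some insert_pos) ++
       PySem.List.slice to_shape (some (insert_pos + 1)) none) == from_shape))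
    = pvABool from_shape to_shape := by
  rw [PySem.List.pyRange_one]
  simp only [Int.sub_zero, Int.toNat_natCast, List.any_map, pvABool]
  congr 1
  funext k
  have h1 : (0 : Int) + (k : Int) = ((k : Nat) : Int) := by omega
  have h2 : ((k : Nat) : Int) + 1 = (((k + 1 : Nat)) : Int) := by push_cast; ring
  simp only [Function.comp, h1, h2, PySem.List.pyGetD_natCast,
    PySem.List.slice_to_natCast, PySem.List.slice_from_natCast]

lemma pvScanDiv_insert_one : ∀ (fs : List Int), pvScanDiv fs (1 :: fs) = true
  | [] => by simp [pvScanDiv]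
  | g :: gs => by
    by_cases hg : g = (1 : Int)
    · subst hg
      simpa [pvScanDiv] using pvScanDiv_insert_one gs
    · simp [pvScanDiv, hg]

lemma pvMain (from_shape to_shape : List Int)
    (h : to_shape.length = from_shape.length + 1) :
    pvABool from_shape to_shape = pvScanDiv from_shape to_shape := by
  induction from_shape generalizing to_shape with
  | nil =>
    match to_shape, h with
    | [t], _ =>
      simp [pvABool, pvScanDiv]
  | cons f fs ih =>
    match to_shape, h with
    | t :: ts, h =>
      have hlen : ts.length = fs.length + 1 := by
        simpa using h
      have hrange : List.range (t :: ts).length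
          = 0 :: (List.range ts.length).map Nat.succ := by
        simpa using List.range_succ_eq_map (n := ts.length)
      rw [pvABool, hrange]
      simp only [List.any_cons, List.any_map]
      have hshift : ((List.range ts.length).any
          ((fun k => (t :: ts).getD k 0 == 1 &&
            (List.take k (t :: ts) ++ List.drop (k + 1) (t :: ts)) == f :: fs) ∘ Nat.succ))
          = ((t == f) && pvABool fs ts) := by
        by_cases htf : t = f
        · subst htf
          simp only [beq_self_eq_true, Bool.true_and, pvABool]
          congr 1
          funext k
          simp [Function.comp, List.take_succ_cons, List.drop_succ_cons]
        · have hall : ((List.range ts.length).any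
              ((fun k => (t :: ts).getD k 0 == 1 &&
                (List.take k (t :: ts) ++ List.drop (k + 1) (t :: ts)) == f :: fs) ∘ Nat.succ))
              = false := by
            apply List.any_eq_false.2
            intro k _
            simp [Function.comp, List.take_succ_cons, List.drop_succ_cons, htf]
          rw [hall, beq_eq_false_iff_ne.mpr htf, Bool.false_and]
      rw [hshift, ih ts hlen]
      simp only [List.getD_cons_zero, List.take_zero, List.nil_append, Nat.zero_add,
        List.drop_succ_cons, List.drop_zero]
      by_cases htf : t = f
      · subst htf
        simp only [beq_self_eq_true, Bool.true_and, pvScanDiv, if_true]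
        by_cases h1 : t = (1 : Int)
        · subst h1
          by_cases hts' : ts = 1 :: fs
          · subst hts'
            simp [pvScanDiv_insert_one fs]
          · simp [hts']
        · simp [h1]
      · have hne : (f == t) = false := beq_eq_false_iff_ne.mpr (fun hh => htf hh.symm)
        rw [beq_eq_false_iff_ne.mpr htf, Bool.false_and, Bool.or_false, pvScanDiv, hne]
        simp

-- ===== VERDICT (by name: the statement is the Claim_ definition above) =====
theorem is_single_dim_insertion_spec : Claim_equal_is_single_dim_insertion := by
  intro from_shape to_shape _
  unfold Spec_is_single_dim_insertion is_single_dim_insertion is_single_dim_insertion_alt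
  by_cases hlen : to_shape.length = from_shape.length + 1
  · rw [if_neg (fun hc => hc hlen), if_neg (fun hc => hc hlen), pvA_loop_eq]
    exact pvMain from_shape to_shape hlen
  · rw [if_pos hlen, if_pos hlen]
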